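-- pv_equiv track=rewrite | github.com/bojanLukovac/Bioinformatika2015 | sais.py | determine_LMS_substring_pointers
-- ===== SOURCE A (Python) =====
-- def determine_LMS_substring_pointers(t_array, bucket_pointers, suffix_array, input_string):
--
-- 	p_1 = []
--
-- 	for idx in range (1,len(t_array)):
-- 		type = t_array[idx]
--
-- 		if type == 1 and t_array[idx - 1] == 0:
-- 			p_1.append(idx)
--
-- 			# add LMS suffix index to SA in appropriate bucket
-- 			# shift bucket pointer left
-- 			# (1st step of induced sort algorithm I)
-- 			char_value = input_string[idx]
-- 			pointer = bucket_pointers[char_value]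
-- 			bucket_pointers[char_value] -= 1
-- 			suffix_array[pointer] = idx
--
-- 	return p_1
-- ===== SOURCE B (Python) =====
-- def determine_LMS_substring_pointers(t_array, bucket_pointers, suffix_array, input_string):
--     # Run-length traversal: skip over each maximal run of equal type values with an
--     # inner while loop; an LMS position is exactly the start of a 1-run whose
--     # preceding run has value 0.  Mutates bucket_pointers and suffix_array like A.
--     p_1 = []
--     n = len(t_array)
--     i = 0
--     prev_val = None
--     while i < n:
--         v = t_array[i]
--         j = i + 1
--         while j < n and t_array[j] == v:
--             j += 1
--         if v == 1 and prev_val == 0: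
--             p_1.append(i)
--             char_value = input_string[i]
--             pointer = bucket_pointers[char_value]
--             bucket_pointers[char_value] = pointer - 1
--             suffix_array[pointer] = i
--         prev_val = v
--         i = j
--     return p_1
-- ===== Notes on version B (the rewrite author's own statement) =====
-- stated objective: alternative
-- what changed: B replaces A's per-index previous-element comparison by a run-length traversal: a nested while loop skips each maximal run of equal type values, maintaining the previous run's value, and an LMS position is recognised as the start of a 1-run preceded by a 0-run; bucket_pointers/suffix_array are mutated identically and in the same order.
import Mathlib
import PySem

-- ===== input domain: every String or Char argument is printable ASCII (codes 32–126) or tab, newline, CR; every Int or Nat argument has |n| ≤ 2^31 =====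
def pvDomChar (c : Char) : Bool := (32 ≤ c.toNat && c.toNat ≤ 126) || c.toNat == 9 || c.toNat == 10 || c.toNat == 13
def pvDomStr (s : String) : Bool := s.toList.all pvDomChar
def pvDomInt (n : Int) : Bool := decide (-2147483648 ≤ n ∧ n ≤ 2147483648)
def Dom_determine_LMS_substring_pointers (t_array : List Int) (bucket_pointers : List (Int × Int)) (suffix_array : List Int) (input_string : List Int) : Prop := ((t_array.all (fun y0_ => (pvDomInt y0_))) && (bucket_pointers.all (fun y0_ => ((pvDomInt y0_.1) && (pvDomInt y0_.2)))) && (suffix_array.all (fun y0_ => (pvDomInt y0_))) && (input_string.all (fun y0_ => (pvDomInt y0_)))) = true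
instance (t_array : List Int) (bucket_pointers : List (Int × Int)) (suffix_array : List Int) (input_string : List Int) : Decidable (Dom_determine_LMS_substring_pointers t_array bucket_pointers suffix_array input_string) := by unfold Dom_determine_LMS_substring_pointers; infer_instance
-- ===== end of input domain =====

-- B replaces A's per-index previous-element test by a run-length traversal (a nested while
-- loop skips each maximal run of equal type values; LMS = start of a 1-run after a 0-run) —
-- objective: alternative.  A and B both mutate bucket_pointers and suffix_array in place
-- (identically, in the same order); the equivalence proved here is about the RETURN value only.

-- ===== PORT A =====
def determine_LMS_substring_pointers (t_array : List Int) (bucket_pointers : List (Int × Int)) (suffix_array : List Int) (input_string : List Int) : List Int :=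
  -- p_1 = []; for idx in range(1, len(t_array)): …
  ((PySem.List.pyRange 1 (t_array.length : Int) 1).foldl
    (fun (st : List Int × PySem.Dict Int Int × List Int) idx =>
      -- type = t_array[idx]  (idx is always in range here)
      let ty := PySem.List.pyGetD t_array idx 0
      if ty = 1 ∧ PySem.List.pyGetD t_array (idx - 1) 0 = 0 then
        -- p_1.append(idx); char_value = input_string[idx]; pointer = bucket_pointers[char_value]
        -- bucket_pointers[char_value] -= 1; suffix_array[pointer] = idx
        -- (the pyGetD/getD defaults are reached only outside Pre_, where Python raises)
        let char_value := PySem.List.pyGetD input_string idx 0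
        let pointer := (PySem.Dict.get? st.2.1 char_value).getD 0
        (st.1 ++ [idx], PySem.Dict.insert st.2.1 char_value (pointer - 1),
         PySem.List.pySetD st.2.2 pointer idx)
      else st)
    ([], PySem.Dict.mk bucket_pointers, suffix_array)).1

-- ===== PORT B =====
-- inner while loop: `j = i + 1; while j < n and t_array[j] == v: j += 1`
def pvInnerB (t : List Int) (v : Int) (j : Nat) : Nat :=
  if h : j < t.length ∧ t.getD j 0 = v then pvInnerB t v (j + 1) else j
termination_by t.length - j
decreasing_by omega

-- needed by the outer loop's termination argument (cited in its decreasing_by)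
theorem pvInnerB_ge (t : List Int) (v : Int) (j : Nat) : j ≤ pvInnerB t v j := by
  unfold pvInnerB
  split
  · have := pvInnerB_ge t v (j + 1); omega
  · exact le_refl j
termination_by t.length - j
decreasing_by omega

-- outer while loop of Source B: state = (p_1, bucket_pointers, suffix_array)
def pvOuterB (t inp : List Int) (i : Nat) (prev : Option Int)
    (st : List Int × PySem.Dict Int Int × List Int) : List Int × PySem.Dict Int Int × List Int :=
  if h : i < t.length then
    let v := t.getD i 0
    let j := pvInnerB t v (i + 1)
    let st' :=
      if v = 1 ∧ prev = some 0 then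
        let char_value := PySem.List.pyGetD inp (i : Int) 0
        let pointer := (PySem.Dict.get? st.2.1 char_value).getD 0
        (st.1 ++ [(i : Int)], PySem.Dict.insert st.2.1 char_value (pointer - 1),
         PySem.List.pySetD st.2.2 pointer (i : Int))
      else st
    pvOuterB t inp j (some v) st'
  else st
termination_by t.length - i
decreasing_by have := pvInnerB_ge t (t.getD i 0) (i + 1); omega

def determine_LMS_substring_pointers_alt (t_array : List Int) (bucket_pointers : List (Int × Int)) (suffix_array : List Int) (input_string : List Int) : List Int :=
  (pvOuterB t_array input_string 0 none ([], PySem.Dict.mk bucket_pointers, suffix_array)).1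

-- ===== PRECONDITION & SPEC =====
-- the LMS positions of t_array (the indices A appends to p_1), as Nat indices
def pvLmsIdx (t : List Int) : List Nat :=
  (List.range t.length).filter (fun i => decide (1 ≤ i ∧ t.getD i 0 = 1 ∧ t.getD (i - 1) 0 = 0))

-- Pre_ excludes exactly the inputs on which Python A raises: an LMS index past the end of
-- input_string (IndexError), a character value absent from bucket_pointers (KeyError), or a
-- (decremented) bucket pointer outside suffix_array's index range (IndexError on the write).
def Pre_determine_LMS_substring_pointers (t_array : List Int) (bucket_pointers : List (Int × Int)) (suffix_array : List Int) (input_string : List Int) : Prop :=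
  ∀ i ∈ pvLmsIdx t_array,
    i < input_string.length ∧
    ((PySem.Dict.mk bucket_pointers).get? (input_string.getD i 0)).isSome ∧
    PySem.Raise.InRange suffix_array.length
      (((PySem.Dict.mk bucket_pointers).get? (input_string.getD i 0)).getD 0
        - ((pvLmsIdx t_array).filter
            (fun j => decide (j < i ∧ input_string.getD j 0 = input_string.getD i 0))).length)
instance (t_array : List Int) (bucket_pointers : List (Int × Int)) (suffix_array : List Int) (input_string : List Int) : Decidable (Pre_determine_LMS_substring_pointers t_array bucket_pointers suffix_array input_string) := by unfold Pre_determine_LMS_substring_pointers; infer_instance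

def pvWitness_determine_LMS_substring_pointers : List Int × (List (Int × Int)) × List Int × List Int :=
  ([1, 0, 1], [(5, 1)], [0, 0], [9, 9, 5])

def Spec_determine_LMS_substring_pointers (t_array : List Int) (bucket_pointers : List (Int × Int)) (suffix_array : List Int) (input_string : List Int) (out : List Int) : Prop := out = determine_LMS_substring_pointers_alt t_array bucket_pointers suffix_array input_string
instance (t_array : List Int) (bucket_pointers : List (Int × Int)) (suffix_array : List Int) (input_string : List Int) (out : List Int) : Decidable (Spec_determine_LMS_substring_pointers t_array bucket_pointers suffix_array input_string out) := by unfold Spec_determine_LMS_substring_pointers; infer_instance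

-- ===== CLAIM (what is proved, stated in full; the proofs are below) =====
def Claim_equal_determine_LMS_substring_pointers : Prop := ∀ (t_array : List Int) (bucket_pointers : List (Int × Int)) (suffix_array : List Int) (input_string : List Int), Dom_determine_LMS_substring_pointers t_array bucket_pointers suffix_array input_string → Pre_determine_LMS_substring_pointers t_array bucket_pointers suffix_array input_string → Spec_determine_LMS_substring_pointers t_array bucket_pointers suffix_array input_string (determine_LMS_substring_pointers t_array bucket_pointers suffix_array input_string)

-- ===== LEMMAS AND PROOFS =====

-- A's fold: the returned first component ignores the dict/suffix state
theorem pvFoldA_fst (t inp : List Int) (l : List Int) (acc : List Int)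
    (d : PySem.Dict Int Int) (s : List Int) :
    (l.foldl
      (fun (st : List Int × PySem.Dict Int Int × List Int) idx =>
        let ty := PySem.List.pyGetD t idx 0
        if ty = 1 ∧ PySem.List.pyGetD t (idx - 1) 0 = 0 then
          let char_value := PySem.List.pyGetD inp idx 0
          let pointer := (PySem.Dict.get? st.2.1 char_value).getD 0
          (st.1 ++ [idx], PySem.Dict.insert st.2.1 char_value (pointer - 1),
           PySem.List.pySetD st.2.2 pointer idx)
        else st)
      (acc, d, s)).1
    = acc ++ l.filter (fun idx =>
        decide (PySem.List.pyGetD t idx 0 = 1 ∧ PySem.List.pyGetD t (idx - 1) 0 = 0)) := by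
  induction l generalizing acc d s with
  | nil => simp
  | cons x xs ih =>
    simp only [List.foldl_cons, List.filter_cons]
    by_cases h : PySem.List.pyGetD t x 0 = 1 ∧ PySem.List.pyGetD t (x - 1) 0 = 0
    · simp only [h, ih]
      simp
    · simp [h, ih]

-- inner while loop: upper bound
theorem pvInnerB_le (t : List Int) (v : Int) (j : Nat) (h : j ≤ t.length) :
    pvInnerB t v j ≤ t.length := by
  unfold pvInnerB
  split
  · next hc => exact pvInnerB_le t v (j + 1) (by omega)
  · exact h
termination_by t.length - j
decreasing_by omega

-- inner while loop: every skipped position carries the run value v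
theorem pvInnerB_run (t : List Int) (v : Int) (j : Nat) :
    ∀ k, j ≤ k → k < pvInnerB t v j → t.getD k 0 = v := by
  intro k hk1 hk2
  rw [pvInnerB] at hk2
  split at hk2
  · next hc =>
    by_cases hkj : k = j
    · subst hkj; exact hc.2
    · exact pvInnerB_run t v (j + 1) k (by omega) hk2
  · omega
termination_by t.length - j
decreasing_by omega

-- the pure index list Source B's outer loop appends (state-free skeleton)
def pvP (t : List Int) (i : Nat) (prev : Option Int) : List Int :=
  if h : i < t.length then
    let v := t.getD i 0
    let j := pvInnerB t v (i + 1)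
    (if v = 1 ∧ prev = some 0 then [(i : Int)] else []) ++ pvP t j (some v)
  else []
termination_by t.length - i
decreasing_by have := pvInnerB_ge t (t.getD i 0) (i + 1); omega

-- Source B's outer loop: the first component ignores the dict/suffix state
theorem pvOuterB_fst (t inp : List Int) : ∀ (m i : Nat) (prev : Option Int) (acc : List Int)
    (d : PySem.Dict Int Int) (s : List Int), t.length - i < m →
    (pvOuterB t inp i prev (acc, d, s)).1 = acc ++ pvP t i prev := by
  intro m
  induction m with
  | zero => intro i prev acc d s h; omega
  | succ m ih =>
    intro i prev acc d s h
    rw [pvOuterB, pvP]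
    by_cases hi : i < t.length
    · have hj := pvInnerB_ge t (t.getD i 0) (i + 1)
      simp only [hi, dif_pos]
      have hj2 := pvInnerB_ge t 1 (i + 1)
      by_cases hc : t.getD i 0 = 1 ∧ prev = some 0
      · simp only [hc, if_pos, and_self]
        rw [ih _ _ _ _ _ (by omega)]
        simp
      · simp only [if_neg hc]
        rw [ih _ _ _ _ _ (by omega)]
        simp
    · simp [hi]

-- run-length characterisation: pvP collects exactly the 0→1 transition indices from i on,
-- given that prev carries t[i-1] (or none at i = 0)
theorem pvP_eq (t : List Int) : ∀ (m i : Nat) (prev : Option Int), t.length - i < m →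
    (i = 0 → prev = none) → (1 ≤ i → prev = some (t.getD (i - 1) 0)) →
    pvP t i prev = ((List.range' i (t.length - i)).filter
      (fun k => decide (1 ≤ k ∧ t.getD k 0 = 1 ∧ t.getD (k - 1) 0 = 0))).map
      (fun k : Nat => (k : Int)) := by
  intro m
  induction m with
  | zero => intro i prev h; omega
  | succ m ih =>
    intro i prev h h0 h1
    rw [pvP]
    by_cases hi : i < t.length
    · simp only [hi, dif_pos]
      set v := t.getD i 0 with hv
      set j := pvInnerB t v (i + 1) with hjdef
      have hj1 : i + 1 ≤ j := pvInnerB_ge t v (i + 1)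
      have hjn : j ≤ t.length := pvInnerB_le t v (i + 1) (by omega)
      have hrun : ∀ k, i ≤ k → k < j → t.getD k 0 = v := by
        intro k hk1 hk2
        by_cases hki : k = i
        · subst hki; rfl
        · exact pvInnerB_run t v (i + 1) k (by omega) hk2
      -- split range' i (n - i) = [i] ++ range' (i+1) (j-i-1) ++ range' j (n-j)
      have hsplit : List.range' i (t.length - i)
          = i :: (List.range' (i + 1) (j - i - 1) ++ List.range' j (t.length - j)) := by
        have e1 : t.length - i = 1 + ((j - i - 1) + (t.length - j)) := by omega
        rw [e1, ← List.range'_append, ← List.range'_append]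
        simp only [mul_one, one_mul]
        have hjj : i + 1 + (j - i - 1) = j := by omega
        rw [hjj, List.range'_one]
        rfl
      rw [hsplit, List.filter_cons, List.filter_append]
      -- middle part filters to []
      have hmid : (List.range' (i + 1) (j - i - 1)).filter
          (fun k => decide (1 ≤ k ∧ t.getD k 0 = 1 ∧ t.getD (k - 1) 0 = 0)) = [] := by
        rw [List.filter_eq_nil_iff]
        intro k hk
        rw [List.mem_range'] at hk
        have hkv : t.getD k 0 = v := hrun k (by omega) (by omega)
        have hkv1 : t.getD (k - 1) 0 = v := hrun (k - 1) (by omega) (by omega)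
        simp only [decide_eq_true_eq, not_and]
        intro _ hx hy
        rw [hkv] at hx; rw [hkv1] at hy
        omega
      rw [hmid]
      -- tail: induction hypothesis at j
      have hjm1 : t.getD (j - 1) 0 = v := hrun (j - 1) (by omega) (by omega)
      have htail := ih j (some v) (by omega) (by omega)
        (by intro _; rw [hjm1])
      rw [htail]
      -- head: the branch condition matches the filter predicate at i
      by_cases hc : v = 1 ∧ prev = some 0
      · have hip : 1 ≤ i := by
          rcases Nat.eq_zero_or_pos i with hz | hp
          · exfalso; rw [h0 hz] at hc; simp at hc
          · exact hp
        have hprev : t.getD (i - 1) 0 = 0 := by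
          have h2 := h1 hip
          rw [h2] at hc
          injection hc.2
        have hq : decide (1 ≤ i ∧ t.getD i 0 = 1 ∧ t.getD (i - 1) 0 = 0) = true := by
          simp only [decide_eq_true_eq]
          exact ⟨hip, hc.1, hprev⟩
        rw [hq]
        simp [hc]
      · have hq : decide (1 ≤ i ∧ t.getD i 0 = 1 ∧ t.getD (i - 1) 0 = 0) = false := by
          simp only [decide_eq_false_iff_not, not_and]
          intro hp hx hy
          have := h1 hp
          exact hc ⟨hx, by rw [this, hy]⟩
        rw [hq]
        simp [hc]
    · have hn : t.length - i = 0 := by omega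
      simp [hi, hn]

-- the two characterisations coincide
theorem pvEq (t_array : List Int) (bucket_pointers : List (Int × Int)) (suffix_array : List Int) (input_string : List Int) :
    determine_LMS_substring_pointers t_array bucket_pointers suffix_array input_string
    = determine_LMS_substring_pointers_alt t_array bucket_pointers suffix_array input_string := by
  unfold determine_LMS_substring_pointers determine_LMS_substring_pointers_alt
  rw [pvFoldA_fst]
  rw [pvOuterB_fst t_array input_string (t_array.length + 1) 0 none [] _ _ (by omega)]
  rw [pvP_eq t_array (t_array.length + 1) 0 none (by omega) (fun _ => rfl) (by omega)]
  rw [PySem.List.pyRange_one, List.filter_map, List.nil_append, List.nil_append]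
  have hlen : ((t_array.length : Int) - 1).toNat = t_array.length - 1 := by omega
  rw [hlen]
  have hfilt : ((fun idx => decide (PySem.List.pyGetD t_array idx 0 = 1 ∧
               PySem.List.pyGetD t_array (idx - 1) 0 = 0)) ∘ (fun k : Nat => (1 : Int) + k))
      = (fun k : Nat => decide (t_array.getD (k + 1) 0 = 1 ∧ t_array.getD k 0 = 0)) := by
    funext k
    have h1 : (1 : Int) + k = ((k + 1 : Nat) : Int) := by push_cast; ring
    have h3 : PySem.List.pyGetD t_array ((k : Int) + 1) 0 = t_array.getD (k + 1) 0 := by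
      rw [show ((k : Int) + 1) = ((k + 1 : Nat) : Int) from by push_cast; ring,
        PySem.List.pyGetD_natCast]
    simp only [Function.comp, h1]
    simp [h3]
  rw [hfilt]
  -- right side: range' 0 n = range n; drop k = 0 (its predicate is false) and reindex
  rw [show t_array.length - 0 = t_array.length from rfl,
    show List.range' 0 t_array.length = List.range t_array.length from (List.range_eq_range').symm]
  cases hn : t_array.length with
  | zero =>
    have ht : t_array = [] := List.eq_nil_of_length_eq_zero hn
    subst ht; simp
  | succ n =>
    rw [List.range_succ_eq_map, List.filter_cons]
    have h0 : decide (1 ≤ 0 ∧ t_array.getD 0 0 = 1 ∧ t_array.getD (0 - 1) 0 = 0) = false := by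
      simp
    rw [h0, List.filter_map]
    have hps : ((fun k => decide (1 ≤ k ∧ t_array.getD k 0 = 1 ∧ t_array.getD (k - 1) 0 = 0)) ∘ Nat.succ)
        = (fun k : Nat => decide (t_array.getD (k + 1) 0 = 1 ∧ t_array.getD k 0 = 0)) := by
      funext k
      simp [Function.comp, Nat.succ_eq_add_one]
    rw [hps]
    simp only [Nat.succ_sub_one, List.map_map, if_neg (by simp : ¬ (false = true))]
    apply List.map_congr_left
    intro k _
    simp [Function.comp]
    ring

-- ===== VERDICT (by name: the statement is the Claim_ definition above) =====
theorem determine_LMS_substring_pointers_spec : Claim_equal_determine_LMS_substring_pointers := by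
  intro t_array bucket_pointers suffix_array input_string _ _
  exact pvEq t_array bucket_pointers suffix_array input_string
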